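-- pv_equiv track=rewrite | github.com/Terence1975-Coder/geopulse | backend/intel/scoring_service.py | _build_risk_explanations
-- ===== SOURCE A (Python) =====
-- from typing import Any, Dict, List, Tuple
--
-- def _build_risk_explanations(risk_signals: List[Dict[str, Any]]) -> List[str]:
--     explanations: List[str] = []
--
--     if any("energy" in str(s.get("cluster_tag", "")).lower() for s in risk_signals):
--         explanations.append("Energy-linked pressure is appearing across active signals with material executive relevance.")
--
--     if any("supply" in str(s.get("cluster_tag", "")).lower() for s in risk_signals):
--         explanations.append("Supply chain disruption indicators remain elevated, increasing continuity and delivery risk.")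
--
--     if any("regulatory" in str(s.get("cluster_tag", "")).lower() for s in risk_signals):
--         explanations.append("Regulatory and compliance pressure is increasing the need for board-defensible response planning.")
--
--     if not explanations and risk_signals:
--         explanations.append("Multiple active risk signals are clustering around cost, continuity, and executive visibility.")
--
--     return explanations[:3]
-- ===== SOURCE B (Python) =====
-- from typing import Any, Dict, List, Tuple
--
-- def _build_risk_explanations(risk_signals: List[Dict[str, Any]]) -> List[str]:
--     # One pass over the signals: lowercase each tag once, record which keywords occur,
--     # then emit the messages from the flags in the fixed order.
--     energy = supply = regulatory = False
--     for s in risk_signals: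
--         t = str(s.get("cluster_tag", "")).lower()
--         if "energy" in t:
--             energy = True
--         if "supply" in t:
--             supply = True
--         if "regulatory" in t:
--             regulatory = True
--
--     explanations: List[str] = []
--     if energy:
--         explanations.append("Energy-linked pressure is appearing across active signals with material executive relevance.")
--     if supply:
--         explanations.append("Supply chain disruption indicators remain elevated, increasing continuity and delivery risk.")
--     if regulatory:
--         explanations.append("Regulatory and compliance pressure is increasing the need for board-defensible response planning.")
--     if not explanations and risk_signals:
--         explanations.append("Multiple active risk signals are clustering around cost, continuity, and executive visibility.")
--     return explanations[:3]
-- ===== Notes on version B (the rewrite author's own statement) =====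
-- stated objective: alternative
-- what changed: B replaces A's three independent any() scans (each re-reading and re-lowercasing every tag) with a single pass that lowercases each tag once and accumulates three keyword flags, emitting the messages from the flags afterwards.
import Mathlib
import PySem

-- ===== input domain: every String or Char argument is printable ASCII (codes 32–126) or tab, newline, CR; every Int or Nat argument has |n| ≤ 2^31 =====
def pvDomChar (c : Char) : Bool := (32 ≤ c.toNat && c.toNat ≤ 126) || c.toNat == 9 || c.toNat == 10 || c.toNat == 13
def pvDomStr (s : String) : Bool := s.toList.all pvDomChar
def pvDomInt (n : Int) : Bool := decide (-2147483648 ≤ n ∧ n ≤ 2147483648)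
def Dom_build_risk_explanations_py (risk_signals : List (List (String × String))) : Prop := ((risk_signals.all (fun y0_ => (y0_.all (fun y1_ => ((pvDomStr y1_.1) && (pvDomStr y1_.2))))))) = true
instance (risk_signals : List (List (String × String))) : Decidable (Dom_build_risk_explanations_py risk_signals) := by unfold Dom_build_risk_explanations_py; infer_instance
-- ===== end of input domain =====

-- Header: B makes ONE pass over the signals, lowercasing each tag once and accumulating
-- three keyword flags, instead of A's three separate any() scans (objective: alternative).

-- s.get("cluster_tag", "") on an association-list dict (first match wins)
def pvTag (s : List (String × String)) : String :=
  PySem.Dict.getD (PySem.Dict.mk s) "cluster_tag" ""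

def pvMsgEnergy : String := "Energy-linked pressure is appearing across active signals with material executive relevance."
def pvMsgSupply : String := "Supply chain disruption indicators remain elevated, increasing continuity and delivery risk."
def pvMsgRegulatory : String := "Regulatory and compliance pressure is increasing the need for board-defensible response planning."
def pvMsgCluster : String := "Multiple active risk signals are clustering around cost, continuity, and executive visibility."

-- ===== PORT A =====
def build_risk_explanations_py (risk_signals : List (List (String × String))) : List String :=
  let explanations : List String := []
  let explanations :=
    if risk_signals.any (fun s => PySem.Str.isIn "energy" (PySem.Str.lower (pvTag s))) then
      explanations ++ [pvMsgEnergy] else explanations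
  let explanations :=
    if risk_signals.any (fun s => PySem.Str.isIn "supply" (PySem.Str.lower (pvTag s))) then
      explanations ++ [pvMsgSupply] else explanations
  let explanations :=
    if risk_signals.any (fun s => PySem.Str.isIn "regulatory" (PySem.Str.lower (pvTag s))) then
      explanations ++ [pvMsgRegulatory] else explanations
  let explanations :=
    if explanations.isEmpty && !risk_signals.isEmpty then
      explanations ++ [pvMsgCluster] else explanations
  PySem.List.slice explanations none (some 3)

-- ===== PORT B =====
def build_risk_explanations_py_alt (risk_signals : List (List (String × String))) : List String :=
  -- one pass: (energy, supply, regulatory) flags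
  let flags : Bool × Bool × Bool :=
    risk_signals.foldl
      (fun acc s =>
        let t := PySem.Str.lower (pvTag s)
        let e := if PySem.Str.isIn "energy" t then true else acc.1
        let su := if PySem.Str.isIn "supply" t then true else acc.2.1
        let r := if PySem.Str.isIn "regulatory" t then true else acc.2.2
        (e, su, r))
      (false, false, false)
  let explanations : List String := []
  let explanations := if flags.1 then explanations ++ [pvMsgEnergy] else explanations
  let explanations := if flags.2.1 then explanations ++ [pvMsgSupply] else explanations
  let explanations := if flags.2.2 then explanations ++ [pvMsgRegulatory] else explanations
  let explanations :=
    if explanations.isEmpty && !risk_signals.isEmpty then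
      explanations ++ [pvMsgCluster] else explanations
  PySem.List.slice explanations none (some 3)

-- ===== PRECONDITION & SPEC =====
def Spec_build_risk_explanations_py (risk_signals : List (List (String × String))) (out : List String) : Prop := out = build_risk_explanations_py_alt risk_signals
instance (risk_signals : List (List (String × String))) (out : List String) : Decidable (Spec_build_risk_explanations_py risk_signals out) := by unfold Spec_build_risk_explanations_py; infer_instance

-- ===== CLAIM (what is proved, stated in full; the proofs are below) =====
def Claim_equal_build_risk_explanations_py : Prop := ∀ (risk_signals : List (List (String × String))), Dom_build_risk_explanations_py risk_signals → Spec_build_risk_explanations_py risk_signals (build_risk_explanations_py risk_signals)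

-- ===== LEMMAS AND PROOFS =====

-- B's one-pass triple-flag fold computes exactly the three any-scans of A.
theorem pv_flags_eq (p1 p2 p3 : List (String × String) → Bool)
    (rs : List (List (String × String))) (e su r : Bool) :
    rs.foldl
      (fun acc s =>
        ((if p1 s then true else acc.1),
         (if p2 s then true else acc.2.1),
         (if p3 s then true else acc.2.2)))
      (e, su, r)
    = (e || rs.any p1, su || rs.any p2, r || rs.any p3) := by
  induction rs generalizing e su r with
  | nil => simp
  | cons x t ih =>
    simp only [List.foldl_cons, List.any_cons, ih]
    by_cases h1 : p1 x <;> by_cases h2 : p2 x <;> by_cases h3 : p3 x <;>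
      simp [h1, h2, h3]

-- ===== VERDICT (by name: the statement is the Claim_ definition above) =====
theorem build_risk_explanations_py_spec : Claim_equal_build_risk_explanations_py := by
  intro rs _
  unfold Spec_build_risk_explanations_py build_risk_explanations_py build_risk_explanations_py_alt
  rw [pv_flags_eq]
  simp
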